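-- pv_equiv track=rewrite | github.com/lucioperez01/TP-Integrador-matematicas-programacion-II- | mat-prog-II.py | exclusivos
-- ===== SOURCE A (Python) =====
-- def exclusivos(conjuntos):
--     keys = list(conjuntos.keys())
--     todosTienenExclusivo = True
--
--     for key in keys:
--         conjuntoActual = conjuntos[key]
--         unionOtros = set()
--
--         for otraKey in keys:
--             if otraKey != key:
--                 unionOtros |= conjuntos[otraKey]
--         exclusivos = conjuntoActual - unionOtros
--
--         if not exclusivos:
--             return False
--
--     return True
-- ===== SOURCE B (Python) =====
-- def exclusivos(conjuntos):
--     counts = {}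
--     for s in conjuntos.values():
--         for x in s:
--             counts[x] = counts.get(x, 0) + 1
--     return all(any(counts[x] == 1 for x in s) for s in conjuntos.values())
-- ===== Notes on version B (the rewrite author's own statement) =====
-- stated objective: alternative
-- what changed: Instead of rebuilding the union of all other sets for every key, B counts each element's occurrences across all sets in one pass and checks that every set contains a count-1 element.
import Mathlib
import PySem

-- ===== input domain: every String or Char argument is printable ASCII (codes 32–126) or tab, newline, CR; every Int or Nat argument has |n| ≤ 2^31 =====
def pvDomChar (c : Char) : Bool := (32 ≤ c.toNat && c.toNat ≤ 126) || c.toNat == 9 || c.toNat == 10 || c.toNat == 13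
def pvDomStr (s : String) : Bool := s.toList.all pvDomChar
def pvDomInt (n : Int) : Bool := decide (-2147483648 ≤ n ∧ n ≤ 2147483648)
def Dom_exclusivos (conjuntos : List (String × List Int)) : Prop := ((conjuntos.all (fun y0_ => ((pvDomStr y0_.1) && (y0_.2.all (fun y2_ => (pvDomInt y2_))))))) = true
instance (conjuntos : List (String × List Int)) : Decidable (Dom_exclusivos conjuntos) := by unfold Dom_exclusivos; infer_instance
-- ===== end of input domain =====

-- B replaces A's per-key union of all other sets by a single occurrence count over all sets, checking each set for a count-1 element.

-- ===== PORT A =====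
-- conjuntos[key]: key always comes from conjuntos.keys(), so the lookup is exact via getD
def pvLookup (conjuntos : List (String × List Int)) (k : String) : List Int :=
  PySem.Dict.getD (PySem.Dict.mk conjuntos) k []

-- the inner 'for otraKey in keys: if otraKey != key: unionOtros |= conjuntos[otraKey]'
def pvUnionOtros (conjuntos : List (String × List Int)) (keys : List String) (key : String) : List Int :=
  keys.foldl (fun acc ok => if ok == key then acc else PySem.Set.union acc (pvLookup conjuntos ok)) []

-- the outer loop with its early 'return False'
def pvLoopA (conjuntos : List (String × List Int)) (keys : List String) : List String → Bool
  | [] => true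
  | key :: rest =>
      let conjuntoActual := pvLookup conjuntos key
      let unionOtros := pvUnionOtros conjuntos keys key
      let excl := PySem.Set.diff conjuntoActual unionOtros
      if excl.isEmpty then false else pvLoopA conjuntos keys rest

def exclusivos (conjuntos : List (String × List Int)) : Bool :=
  let keys := PySem.Dict.keys (PySem.Dict.mk conjuntos)
  pvLoopA conjuntos keys keys

-- ===== PORT B =====
def exclusivos_alt (conjuntos : List (String × List Int)) : Bool :=
  let vals := PySem.Dict.values (PySem.Dict.mk conjuntos)
  let counts := vals.foldl
    (fun d s => s.foldl (fun d x => PySem.Dict.insert d x (PySem.Dict.getD d x 0 + 1)) d)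
    (PySem.Dict.empty : PySem.Dict Int Int)
  vals.all (fun s => s.any (fun x => PySem.Dict.getD counts x 0 == 1))

-- ===== PRECONDITION & SPEC =====
-- Pre_ is the faithful encoding of A's argument, a dict[str, set[int]]: keys pairwise
-- distinct and each value list duplicate-free; it excludes no input a Python caller
-- of A can produce (a Python dict cannot repeat keys, a Python set cannot repeat elements).
def Pre_exclusivos (conjuntos : List (String × List Int)) : Prop :=
  (conjuntos.map Prod.fst).Nodup ∧ ∀ p ∈ conjuntos, p.2.Nodup
instance (conjuntos : List (String × List Int)) : Decidable (Pre_exclusivos conjuntos) := by unfold Pre_exclusivos; infer_instance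

def pvWitness_exclusivos : (List (String × List Int)) := [("a", [1, 2]), ("b", [2, 3])]

def Spec_exclusivos (conjuntos : List (String × List Int)) (out : Bool) : Prop := out = exclusivos_alt conjuntos
instance (conjuntos : List (String × List Int)) (out : Bool) : Decidable (Spec_exclusivos conjuntos out) := by unfold Spec_exclusivos; infer_instance

-- ===== CLAIM (what is proved, stated in full; the proofs are below) =====
def Claim_equal_exclusivos : Prop := ∀ (conjuntos : List (String × List Int)), Dom_exclusivos conjuntos → Pre_exclusivos conjuntos → Spec_exclusivos conjuntos (exclusivos conjuntos)

-- ===== LEMMAS AND PROOFS =====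

-- the common specification both ports are proved equivalent to: every set has an
-- element that appears in no set with a different key
def pvHasOwn (conjuntos : List (String × List Int)) (p : String × List Int) : Prop :=
  ∃ x ∈ p.2, ∀ q ∈ conjuntos, x ∈ q.2 → q.1 = p.1

theorem mem_foldl_union (c : List (String × List Int)) (x : Int) (k : String) (keys : List String) :
    ∀ acc : List Int,
    (x ∈ keys.foldl (fun acc ok => if ok == k then acc else PySem.Set.union acc (pvLookup c ok)) acc
      ↔ x ∈ acc ∨ ∃ ok ∈ keys, ok ≠ k ∧ x ∈ pvLookup c ok) := by
  induction keys with
  | nil => simp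
  | cons a t ih =>
      intro acc
      rw [List.foldl_cons, ih]
      by_cases hak : a = k
      · subst hak; simp
      · simp only [beq_iff_eq, if_neg hak, PySem.Set.mem_union, List.mem_cons]
        constructor
        · rintro (⟨h|h⟩|⟨ok,hm,hne,hx⟩)
          · exact Or.inl h
          · exact Or.inr ⟨a, Or.inl rfl, hak, h⟩
          · exact Or.inr ⟨ok, Or.inr hm, hne, hx⟩
        · rintro (h|⟨ok,(rfl|hm),hne,hx⟩)
          · exact Or.inl (Or.inl h)
          · exact Or.inl (Or.inr hx)
          · exact Or.inr ⟨ok, hm, hne, hx⟩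

theorem loopA_iff (c : List (String × List Int)) (keys ks : List String) :
    pvLoopA c keys ks = true ↔
      ∀ k ∈ ks, ∃ x ∈ pvLookup c k, x ∉ pvUnionOtros c keys k := by
  induction ks with
  | nil => simp [pvLoopA]
  | cons a t ih =>
      simp only [pvLoopA, List.mem_cons]
      by_cases he : (PySem.Set.diff (pvLookup c a) (pvUnionOtros c keys a)).isEmpty
      · simp only [if_pos he, Bool.false_eq_true, false_iff]
        intro hall
        obtain ⟨x, hx, hnx⟩ := hall a (Or.inl rfl)
        have : x ∈ PySem.Set.diff (pvLookup c a) (pvUnionOtros c keys a) :=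
          (PySem.Set.mem_diff _ _ _).mpr ⟨hx, hnx⟩
        rw [List.isEmpty_iff] at he
        simp [he] at this
      · simp only [if_neg he, ih]
        constructor
        · intro hall k hk
          rcases hk with rfl | hk
          · have hne : PySem.Set.diff (pvLookup c k) (pvUnionOtros c keys k) ≠ [] := by
              intro h; exact he (by simp [h])
            obtain ⟨x, hx⟩ := List.exists_mem_of_ne_nil _ hne
            obtain ⟨h1, h2⟩ := (PySem.Set.mem_diff _ _ _).mp hx
            exact ⟨x, h1, h2⟩
          · exact hall k hk
        · intro hall k hk; exact hall k (Or.inr hk)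

theorem pvLookup_eq (c : List (String × List Int)) (hk : (c.map Prod.fst).Nodup)
    {p : String × List Int} (hp : p ∈ c) : pvLookup c p.1 = p.2 := by
  exact PySem.Dict.getD_of_mem_items (PySem.Dict.mk c) (by simpa using hp) hk []

theorem mem_unionOtros_iff (c : List (String × List Int)) (hk : (c.map Prod.fst).Nodup)
    (k : String) (x : Int) :
    x ∈ pvUnionOtros c (c.map Prod.fst) k ↔ ∃ q ∈ c, q.1 ≠ k ∧ x ∈ q.2 := by
  unfold pvUnionOtros
  rw [mem_foldl_union]
  simp only [List.mem_nil_iff, false_or]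
  constructor
  · rintro ⟨ok, hok, hne, hx⟩
    obtain ⟨q, hq, rfl⟩ := List.mem_map.mp hok
    exact ⟨q, hq, hne, by rwa [pvLookup_eq c hk hq] at hx⟩
  · rintro ⟨q, hq, hne, hx⟩
    exact ⟨q.1, List.mem_map.mpr ⟨q, hq, rfl⟩, hne, by rwa [pvLookup_eq c hk hq]⟩

theorem exclusivos_A_iff (c : List (String × List Int)) (h : Pre_exclusivos c) :
    exclusivos c = true ↔ ∀ p ∈ c, pvHasOwn c p := by
  obtain ⟨hk, -⟩ := h
  have hkeys : PySem.Dict.keys (PySem.Dict.mk c) = c.map Prod.fst := rfl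
  unfold exclusivos
  rw [hkeys, loopA_iff, List.forall_mem_map]
  apply forall_congr'; intro p
  apply imp_congr_right; intro hp
  rw [pvLookup_eq c hk hp]
  unfold pvHasOwn
  apply exists_congr; intro x
  apply and_congr_right; intro hx
  rw [mem_unionOtros_iff c hk]
  push Not
  constructor
  · intro hall q hq hxq
    by_contra hne
    exact (hall q hq hne) hxq
  · intro hall q hq hne hxq
    exact hne (hall q hq hxq)

theorem count_flatten_eq_countP (c : List (String × List Int)) (hv : ∀ p ∈ c, p.2.Nodup) (x : Int) :
    ((c.map (fun p => p.2)).flatten).count x = c.countP (fun q => decide (x ∈ q.2)) := by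
  induction c with
  | nil => simp
  | cons p t ih =>
      simp only [List.map_cons, List.flatten_cons, List.count_append, List.countP_cons]
      rw [ih (fun q hq => hv q (List.mem_cons_of_mem _ hq))]
      by_cases hx : x ∈ p.2
      · rw [List.count_eq_one_of_mem (hv p (List.mem_cons_self)) hx]
        simp [hx]; omega
      · rw [List.count_eq_zero.mpr hx]
        simp [hx]

theorem countP_eq_one_iff (c : List (String × List Int)) (hk : (c.map Prod.fst).Nodup)
    {p : String × List Int} (hp : p ∈ c) {x : Int} (hx : x ∈ p.2) :
    c.countP (fun q => decide (x ∈ q.2)) = 1 ↔ ∀ q ∈ c, x ∈ q.2 → q.1 = p.1 := by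
  obtain ⟨l₁, l₂, rfl⟩ := List.append_of_mem hp
  have hmap : ((l₁ ++ p :: l₂).map Prod.fst) = l₁.map Prod.fst ++ p.1 :: l₂.map Prod.fst := by
    simp
  rw [hmap] at hk
  have h1 : ∀ q ∈ l₁, q.1 ≠ p.1 := by
    intro q hq heq
    have : p.1 ∈ l₁.map Prod.fst := heq ▸ List.mem_map.mpr ⟨q, hq, rfl⟩
    exact (List.disjoint_of_nodup_append hk) this List.mem_cons_self
  have h2 : ∀ q ∈ l₂, q.1 ≠ p.1 := by
    intro q hq heq
    have hnd := (List.nodup_append.mp hk).2.1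
    rw [List.nodup_cons] at hnd
    exact hnd.1 (heq ▸ List.mem_map.mpr ⟨q, hq, rfl⟩)
  rw [List.countP_append, List.countP_cons]
  simp only [hx, decide_true, if_true]
  constructor
  · intro hone q hq hxq
    have z1 : l₁.countP (fun q => decide (x ∈ q.2)) = 0 := by omega
    have z2 : l₂.countP (fun q => decide (x ∈ q.2)) = 0 := by omega
    rw [List.countP_eq_zero] at z1 z2
    rcases List.mem_append.mp hq with hq1 | hq2
    · exact absurd (by simpa using hxq) (by simpa using z1 q hq1)
    · rcases List.mem_cons.mp hq2 with rfl | hq2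
      · rfl
      · exact absurd (by simpa using hxq) (by simpa using z2 q hq2)
  · intro hall
    have z1 : l₁.countP (fun q => decide (x ∈ q.2)) = 0 := by
      rw [List.countP_eq_zero]
      intro q hq
      simp only [decide_eq_true_eq]
      intro hxq
      exact h1 q hq (hall q (List.mem_append.mpr (Or.inl hq)) hxq)
    have z2 : l₂.countP (fun q => decide (x ∈ q.2)) = 0 := by
      rw [List.countP_eq_zero]
      intro q hq
      simp only [decide_eq_true_eq]
      intro hxq
      exact h2 q hq (hall q (by simp [hq]) hxq)
    omega

theorem getD_counts (c : List (String × List Int)) (x : Int) :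
    PySem.Dict.getD
      ((c.map (fun p => p.2)).foldl
        (fun d s => s.foldl (fun d x => PySem.Dict.insert d x (PySem.Dict.getD d x 0 + 1)) d)
        (PySem.Dict.empty : PySem.Dict Int Int)) x 0
      = (((c.map (fun p => p.2)).flatten).count x : Int) := by
  rw [← List.foldl_flatten, PySem.Dict.foldl_insert_getD_add_one_eq_counter, PySem.Dict.getD_counter]

theorem exclusivos_B_iff (c : List (String × List Int)) (h : Pre_exclusivos c) :
    exclusivos_alt c = true ↔ ∀ p ∈ c, pvHasOwn c p := by
  obtain ⟨hk, hv⟩ := h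
  have hvals : PySem.Dict.values (PySem.Dict.mk c) = c.map (fun p => p.2) := rfl
  simp only [exclusivos_alt]
  rw [hvals]
  simp only [getD_counts]
  rw [List.all_eq_true]
  rw [List.forall_mem_map]
  apply forall_congr'; intro p
  apply imp_congr_right; intro hp
  rw [List.any_eq_true]
  unfold pvHasOwn
  apply exists_congr; intro x
  apply and_congr_right; intro hx
  rw [count_flatten_eq_countP c hv x]
  rw [beq_iff_eq]
  rw [show ((c.countP (fun q => decide (x ∈ q.2)) : Int) = 1 ↔ c.countP (fun q => decide (x ∈ q.2)) = 1) from by constructor <;> omega]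
  exact countP_eq_one_iff c hk hp hx

-- ===== VERDICT (by name: the statement is the Claim_ definition above) =====
theorem exclusivos_spec : Claim_equal_exclusivos := by
  intro c _ hpre
  unfold Spec_exclusivos
  have h := (exclusivos_A_iff c hpre).trans (exclusivos_B_iff c hpre).symm
  cases hA : exclusivos c <;> cases hB : exclusivos_alt c <;> simp_all
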